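-- pv_equiv track=rewrite | github.com/pegeler/eddington2 | python/src/eddington.py | E_cum
-- ===== SOURCE A (Python) =====
-- class Counter(dict):
--     def __missing__(self, key):
--         return 0
--
-- def E_cum(rides) -> list:
--     """Cumulative Eddington Number for Cycling
--
--     :param rides: A list of mileages for each ride.
--     :type rides: list
--     :rtype: list
--     :returns: The Eddington number, E, for each element in the data.
--     """
--
--     n = len(rides)
--     running, above = 0, 0
--     E = []
--     H = Counter()
--
--     for r in rides:
--         ride = int(r)
--
--         if ride > running:
--             above += 1
--
--             if ride < n:
--                 H[ride] += 1
--
--             if above > running: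
--                 running += 1
--                 above -= H.pop(running, 0)
--
--         E.append(running)
--
--     return E
-- ===== SOURCE B (Python) =====
-- def _bisect_left(a, x):
--     """Leftmost insertion point for x in sorted list a (hand-rolled; no imports)."""
--     lo, hi = 0, len(a)
--     while lo < hi:
--         mid = (lo + hi) // 2
--         if a[mid] < x:
--             lo = mid + 1
--         else:
--             hi = mid
--     return lo
--
-- def E_cum(rides) -> list:
--     """Cumulative Eddington Number for Cycling.
--
--     Keeps the prefix's truncated mileages in an ascending sorted list and, at
--     each step, tests the crossover directly: E grows (by at most one) exactly
--     when the prefix holds at least E+1 rides of at least E+1 miles, i.e. when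
--     len(s) - bisect_left(s, E+1) >= E+1.
--     """
--     E = []
--     e = 0
--     s = []
--     for r in rides:
--         x = int(r)
--         s.insert(_bisect_left(s, x), x)
--         if len(s) - _bisect_left(s, e + 1) >= e + 1:
--             e += 1
--         E.append(e)
--     return E
-- ===== Notes on version B (the rewrite author's own statement) =====
-- stated objective: alternative
-- what changed: Replaces A's incremental running/above counters with a histogram dict by a sort-and-find-crossover strategy: B keeps the prefix's mileages in an ascending sorted list (hand-rolled binary-search insert) and each step tests directly whether the prefix holds at least E+1 rides of at least E+1 miles via len(s) - bisect_left(s, E+1) >= E+1.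
import Mathlib
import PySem

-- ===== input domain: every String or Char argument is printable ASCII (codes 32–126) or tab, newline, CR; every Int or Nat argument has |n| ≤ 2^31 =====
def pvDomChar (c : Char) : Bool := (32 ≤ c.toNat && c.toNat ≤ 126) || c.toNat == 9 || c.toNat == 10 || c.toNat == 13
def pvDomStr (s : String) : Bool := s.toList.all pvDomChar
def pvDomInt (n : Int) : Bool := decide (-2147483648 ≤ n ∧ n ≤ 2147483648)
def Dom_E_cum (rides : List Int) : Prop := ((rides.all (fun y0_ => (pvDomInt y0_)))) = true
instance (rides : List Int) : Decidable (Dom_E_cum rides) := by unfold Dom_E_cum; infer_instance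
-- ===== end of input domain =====

-- B replaces A's single-pass counter/histogram bookkeeping by a sorted prefix list with
-- binary-search insertion and a direct crossover test (alternative algorithm, not faster);
-- both return the same list for every input.

-- ===== PORT A =====
-- A's loop: state (running, above, H); Counter's `H[ride] += 1` is Dict.modify with default 0,
-- `H.pop(running, 0)` is getD then erase.
def aLoop (n : Int) (rest : List Int) (running above : Int) (H : PySem.Dict Int Int) : List Int :=
  match rest with
  | [] => []
  | r :: rest' =>
    let ride := r
    if ride > running then
      let above1 := above + 1
      let H1 := if ride < n then H.modify ride 0 (· + 1) else H
      if above1 > running then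
        let running1 := running + 1
        let popv := H1.getD running1 0
        let H2 := H1.erase running1
        running1 :: aLoop n rest' running1 (above1 - popv) H2
      else
        running :: aLoop n rest' running above1 H1
    else
      running :: aLoop n rest' running above H

def E_cum (rides : List Int) : List Int :=
  aLoop (rides.length : Int) rides 0 0 PySem.Dict.empty

-- ===== PORT B =====
-- B's hand-rolled bisect_left: the while-loop as recursion on hi - lo.
-- a[mid] is always in range when the loop body runs; ported via pyGet? with a
-- default that is never used.
def bLeftLoop (a : List Int) (x lo hi : Int) : Int :=
  if h : lo < hi then
    let mid := PySem.Int.floordiv (lo + hi) 2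
    if (PySem.List.pyGet? a mid).getD 0 < x then bLeftLoop a x (mid + 1) hi
    else bLeftLoop a x lo mid
  else lo
termination_by (hi - lo).toNat
decreasing_by
  · have hm := @Int.fdiv_eq_ediv (lo + hi) 2
    simp only [PySem.Int.floordiv]
    simp at hm
    omega
  · have hm := @Int.fdiv_eq_ediv (lo + hi) 2
    simp only [PySem.Int.floordiv]
    simp at hm
    omega

def pyBisectLeft (a : List Int) (x : Int) : Int :=
  bLeftLoop a x 0 (a.length : Int)

-- B's loop: state (e, s) with s the sorted prefix.
def bLoop (rest : List Int) (e : Int) (s : List Int) : List Int :=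
  match rest with
  | [] => []
  | r :: rest' =>
    let x := r
    let s1 := PySem.List.insert s (pyBisectLeft s x) x
    let e1 := if (s1.length : Int) - pyBisectLeft s1 (e + 1) ≥ e + 1 then e + 1 else e
    e1 :: bLoop rest' e1 s1

def E_cum_alt (rides : List Int) : List Int :=
  bLoop rides 0 []

-- ===== PRECONDITION & SPEC =====
def Spec_E_cum (rides : List Int) (out : List Int) : Prop := out = E_cum_alt rides
instance (rides : List Int) (out : List Int) : Decidable (Spec_E_cum rides out) := by unfold Spec_E_cum; infer_instance

-- ===== CLAIM (what is proved, stated in full; the proofs are below) =====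
def Claim_equal_E_cum : Prop := ∀ (rides : List Int), Dom_E_cum rides → Spec_E_cum rides (E_cum rides)

-- ===== LEMMAS AND PROOFS =====

theorem find?_filter_ne_key (l : List (Int × Int)) (k k' : Int) (h : k' ≠ k) :
    List.find? (fun p => p.1 == k') (l.filter (fun p => !(p.1 == k))) =
      List.find? (fun p => p.1 == k') l := by
  induction l with
  | nil => rfl
  | cons p rest ih =>
    by_cases hpk : p.1 = k
    · have h1 : (p.1 == k') = false := by simp [hpk]; omega
      have h3 : (k == k') = false := by simp; omega
      simp [hpk, h3, ih]
    · by_cases h2 : p.1 = k'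
      · simp [h2, h]
      · have h1 : (p.1 == k') = false := by simp [h2]
        simp [hpk, h1, ih]

theorem find?_filter_self_key (l : List (Int × Int)) (k : Int) :
    List.find? (fun p => p.1 == k) (l.filter (fun p => !(p.1 == k))) = none := by
  rw [List.find?_eq_none]
  intro p hp
  simp only [List.mem_filter] at hp
  simpa using hp.2

theorem dict_get?_erase (d : PySem.Dict Int Int) (k k' : Int) :
    (d.erase k).get? k' = if k' = k then none else d.get? k' := by
  rcases d with ⟨items⟩
  simp only [PySem.Dict.get?, PySem.Dict.erase]
  by_cases h : k' = k
  · subst h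
    rw [find?_filter_self_key]
    simp
  · rw [find?_filter_ne_key items k k' h, if_neg h]

theorem dict_getD_erase (d : PySem.Dict Int Int) (k k' : Int) :
    (d.erase k).getD k' 0 = if k' = k then 0 else d.getD k' 0 := by
  simp only [PySem.Dict.getD, dict_get?_erase]
  split <;> rfl

theorem countP_gt_split (l : List Int) (a : Int) :
    l.countP (fun x => decide (x > a)) =
      l.countP (fun x => decide (x > a + 1)) + l.count (a + 1) := by
  induction l with
  | nil => simp
  | cons x l ih =>
    simp only [List.countP_cons, List.count_cons, ih, beq_iff_eq]
    split_ifs with h1 h2 h3 h2 h3 <;> simp_all <;> omega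

theorem countP_lt_add_gt (l : List Int) (a : Int) :
    l.countP (fun x => decide (x < a + 1)) + l.countP (fun x => decide (x > a)) = l.length := by
  induction l with
  | nil => simp
  | cons x l ih =>
    simp only [List.countP_cons, List.length_cons, decide_eq_true_eq]
    split_ifs with h1 h2 h2 <;> omega

theorem sorted_getElem_le (a : List Int) (hs : a.Pairwise (· ≤ ·)) (i j : Nat)
    (hj : j < a.length) (hij : i ≤ j) : a[i]'(by omega) ≤ a[j] := by
  rcases Nat.lt_or_ge i j with h | h
  · exact List.pairwise_iff_getElem.mp hs i j (by omega) hj h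
  · have : i = j := by omega
    subst this
    rfl

theorem countP_boundary (a : List Int) (p : Int → Bool) (k : Nat) (hk : k ≤ a.length)
    (h1 : ∀ (j : Nat) (h : j < a.length), j < k → p a[j])
    (h2 : ∀ (j : Nat) (h : j < a.length), k ≤ j → ¬ p a[j] = true) :
    a.countP p = k := by
  induction a generalizing k with
  | nil => simp at hk ⊢; omega
  | cons y t ih =>
    cases k with
    | zero =>
      rw [List.countP_eq_zero]
      intro v hv
      obtain ⟨j, hj, rfl⟩ := List.mem_iff_getElem.mp hv
      exact h2 j hj (by omega)
    | succ k =>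
      have hp : p y = true := h1 0 (by simp) (by omega)
      rw [List.countP_cons, if_pos hp]
      have := ih k (by simpa using hk)
        (fun j h hj => by simpa using h1 (j + 1) (by simpa using h) (by omega))
        (fun j h hj => by simpa using h2 (j + 1) (by simpa using h) (by omega))
      omega

theorem bLeftLoop_spec (a : List Int) (x : Int) (hs : a.Pairwise (· ≤ ·)) :
    ∀ (fuel : Nat) (lo hi : Int), (hi - lo).toNat ≤ fuel → 0 ≤ lo → lo ≤ hi →
    hi ≤ (a.length : Int) →
    (∀ (j : Nat) (h : j < a.length), (j : Int) < lo → a[j] < x) →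
    (∀ (j : Nat) (h : j < a.length), hi ≤ (j : Int) → x ≤ a[j]) →
    0 ≤ bLeftLoop a x lo hi ∧ bLeftLoop a x lo hi ≤ (a.length : Int) ∧
      (∀ (j : Nat) (h : j < a.length), (j : Int) < bLeftLoop a x lo hi → a[j] < x) ∧
      (∀ (j : Nat) (h : j < a.length), bLeftLoop a x lo hi ≤ (j : Int) → x ≤ a[j]) := by
  intro fuel
  induction fuel with
  | zero =>
    intro lo hi hfuel h0 hlohi hhi hinv1 hinv2
    have hle : hi = lo := by omega
    subst hle
    rw [bLeftLoop, dif_neg (by omega)]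
    exact ⟨h0, hhi, hinv1, hinv2⟩
  | succ fuel ih =>
    intro lo hi hfuel h0 hlohi hhi hinv1 hinv2
    rw [bLeftLoop]
    by_cases h : lo < hi
    · rw [dif_pos h]
      have hmid := @Int.fdiv_eq_ediv (lo + hi) 2
      simp only [PySem.Int.floordiv]
      simp at hmid
      set mid := (lo + hi).fdiv 2 with hmiddef
      have hmlo : lo ≤ mid := by omega
      have hmhi : mid < hi := by omega
      have hmnat : ((mid.toNat : Int)) = mid := Int.toNat_of_nonneg (by omega)
      have hmltlen : mid.toNat < a.length := by omega
      have hsome := PySem.List.pyGet?_natCast a mid.toNat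
      rw [hmnat] at hsome
      rw [hsome, List.getElem?_eq_getElem hmltlen, Option.getD_some]
      by_cases hcmp : a[mid.toNat] < x
      · rw [if_pos hcmp]
        apply ih (mid + 1) hi (by omega) (by omega) (by omega) hhi
        · intro j hj hjlt
          have : j ≤ mid.toNat := by omega
          exact lt_of_le_of_lt (sorted_getElem_le a hs j mid.toNat hmltlen this) hcmp
        · exact hinv2
      · rw [if_neg hcmp]
        apply ih lo mid (by omega) (by omega) (by omega) (by omega) hinv1
        intro j hj hjge
        have : mid.toNat ≤ j := by omega
        exact le_trans (by omega) (sorted_getElem_le a hs mid.toNat j hj this)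
    · rw [dif_neg h]
      have hle : hi = lo := by omega
      subst hle
      exact ⟨h0, hhi, hinv1, hinv2⟩

theorem pyBisectLeft_spec (a : List Int) (x : Int) (hs : a.Pairwise (· ≤ ·)) :
    0 ≤ pyBisectLeft a x ∧ pyBisectLeft a x ≤ (a.length : Int) ∧
      (∀ (j : Nat) (h : j < a.length), (j : Int) < pyBisectLeft a x → a[j] < x) ∧
      (∀ (j : Nat) (h : j < a.length), pyBisectLeft a x ≤ (j : Int) → x ≤ a[j]) := by
  apply bLeftLoop_spec a x hs ((a.length : Int) - 0).toNat 0 (a.length : Int) (by omega)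
    (by omega) (by omega) (by omega)
  · intro j hj hjlt
    omega
  · intro j hj hjge
    omega

theorem pyBisectLeft_eq_countP (a : List Int) (x : Int) (hs : a.Pairwise (· ≤ ·)) :
    pyBisectLeft a x = (a.countP (fun v => decide (v < x)) : Int) := by
  obtain ⟨hb0, hblen, hlt, hge⟩ := pyBisectLeft_spec a x hs
  have : a.countP (fun v => decide (v < x)) = (pyBisectLeft a x).toNat := by
    apply countP_boundary a _ (pyBisectLeft a x).toNat (by omega)
    · intro j hj hjlt
      simp only [decide_eq_true_eq]
      exact hlt j hj (by omega)
    · intro j hj hjge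
      simp only [decide_eq_true_eq, not_lt]
      exact hge j hj (by omega)
  omega

theorem pyInsert_take_drop (s : List Int) (i : Int) (v : Int) (h0 : 0 ≤ i)
    (hl : i ≤ (s.length : Int)) :
    PySem.List.insert s i v = s.take i.toNat ++ v :: s.drop i.toNat := by
  simp only [PySem.List.insert, PySem.List.sliceIndices]
  norm_num
  rw [if_neg (by omega), min_eq_left hl]

theorem pyInsert_perm (s : List Int) (i : Int) (v : Int) (h0 : 0 ≤ i)
    (hl : i ≤ (s.length : Int)) :
    (PySem.List.insert s i v).Perm (v :: s) := by
  rw [pyInsert_take_drop s i v h0 hl]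
  have h := @List.perm_middle _ v (s.take i.toNat) (s.drop i.toNat)
  rwa [List.take_append_drop] at h

theorem pyInsert_bisect_sorted (s : List Int) (x : Int) (hs : s.Pairwise (· ≤ ·)) :
    (PySem.List.insert s (pyBisectLeft s x) x).Pairwise (· ≤ ·) := by
  obtain ⟨hb0, hblen, hlt, hge⟩ := pyBisectLeft_spec s x hs
  rw [pyInsert_take_drop s _ x hb0 hblen]
  have htk : ∀ v ∈ s.take (pyBisectLeft s x).toNat, v < x := by
    intro v hv
    obtain ⟨j, hj, rfl⟩ := List.mem_iff_getElem.mp hv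
    rw [List.getElem_take]
    exact hlt j (by simp at hj; omega) (by simp at hj; omega)
  have hdr : ∀ v ∈ s.drop (pyBisectLeft s x).toNat, x ≤ v := by
    intro v hv
    obtain ⟨j, hj, rfl⟩ := List.mem_iff_getElem.mp hv
    rw [List.getElem_drop]
    exact hge _ (by simp at hj; omega) (by simp at hj; omega)
  rw [List.pairwise_append]
  refine ⟨List.Pairwise.sublist (List.take_sublist _ _) hs, ?_, ?_⟩
  · rw [List.pairwise_cons]
    exact ⟨hdr, List.Pairwise.sublist (List.drop_sublist _ _) hs⟩
  · intro u hu w hw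
    rcases List.mem_cons.mp hw with rfl | hw
    · exact le_of_lt (htk u hu)
    · exact le_of_lt (lt_of_lt_of_le (htk u hu) (hdr w hw))

-- main invariant lemma: A's loop state and B's sorted list are both determined
-- by the processed prefix `seen`
theorem loop_eq (n : Int) (rest : List Int) : ∀ (seen : List Int) (running above : Int)
    (H : PySem.Dict Int Int) (s : List Int),
    (seen.length : Int) + rest.length = n →
    running ≤ (seen.length : Int) →
    above = (seen.countP (fun x => decide (x > running)) : Int) →
    above ≤ running →
    (∀ v, H.getD v 0 = if running < v ∧ v < n then (seen.count v : Int) else 0) →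
    s.Pairwise (· ≤ ·) →
    s.Perm seen →
    aLoop n rest running above H = bLoop rest running s := by
  induction rest with
  | nil => intros; rfl
  | cons r rest' ih =>
    intro seen running above H s hn hrun habove hub hH hsort hperm
    simp only [List.length_cons] at hn
    push_cast at hn
    have crr : ((seen ++ [r]).count r : Int) = (seen.count r : Int) + 1 := by
      simp
    have crn : ∀ v, v ≠ r → (seen ++ [r]).count v = seen.count v := by
      intro v hv
      simp [List.count_append, Ne.symm hv]
    have hcnt1 : ((seen ++ [r]).countP (fun x => decide (x > running)) : Int) =
        above + (if r > running then 1 else 0) := by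
      rw [habove]
      by_cases h : r > running
      · simp [List.countP_append, h]
      · simp [List.countP_append, h]
    simp only [aLoop, bLoop]
    set s1 := PySem.List.insert s (pyBisectLeft s r) r with hs1def
    have hb := pyBisectLeft_spec s r hsort
    have hs1sort : s1.Pairwise (· ≤ ·) := pyInsert_bisect_sorted s r hsort
    have hsr : (seen ++ [r]).Perm (r :: seen) := by
      have h := @List.perm_middle _ r seen []
      simp only [List.append_nil] at h
      exact h
    have hs1perm : s1.Perm (seen ++ [r]) :=
      ((pyInsert_perm s _ r hb.1 hb.2.1).trans (hperm.cons r)).trans hsr.symm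
    have hs1len : (s1.length : Int) = (seen.length : Int) + 1 := by
      rw [hs1perm.length_eq]
      simp
    have hcondeq : (s1.length : Int) - pyBisectLeft s1 (running + 1) =
        ((seen ++ [r]).countP (fun x => decide (x > running)) : Int) := by
      rw [pyBisectLeft_eq_countP s1 (running + 1) hs1sort,
        hs1perm.countP_eq (fun v => decide (v < running + 1)), hs1len]
      have hsplit := countP_lt_add_gt (seen ++ [r]) running
      simp only [List.length_append, List.length_cons, List.length_nil] at hsplit
      omega
    rw [hcondeq]
    by_cases hr : r > running
    · simp only [if_pos hr]
      have hH1 : ∀ v, (if r < n then H.modify r 0 (· + 1) else H).getD v 0 =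
          if running < v ∧ v < n then ((seen ++ [r]).count v : Int) else 0 := by
        intro v
        by_cases hv : v = r
        · subst hv
          by_cases hrn : v < n
          · rw [if_pos hrn, PySem.Dict.getD_modify, if_pos rfl, hH, crr]
            split_ifs with h
            · rfl
            · omega
          · rw [if_neg hrn, hH]
            rw [if_neg (by omega), if_neg (by omega)]
        · have heq : ((seen ++ [r]).count v : Int) = (seen.count v : Int) := by
            rw [crn v hv]
          by_cases hrn : r < n
          · rw [if_pos hrn, PySem.Dict.getD_modify, if_neg hv, hH, heq]
          · rw [if_neg hrn, hH, heq]
      by_cases hab : above + 1 > running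
      · simp only [if_pos hab]
        have habeq : above = running := by omega
        have hge : ((seen ++ [r]).countP (fun x => decide (x > running)) : Int) ≥ running + 1 := by
          rw [hcnt1, if_pos hr]; omega
        rw [if_pos hge]
        congr 1
        rcases rest' with _ | ⟨r2, rest''⟩
        · rfl
        · simp only [List.length_cons] at hn
          push_cast at hn
          have hn1 : running + 1 < n := by omega
          have hpop : (if r < n then H.modify r 0 (· + 1) else H).getD (running + 1) 0 =
              ((seen ++ [r]).count (running + 1) : Int) := by
            rw [hH1, if_pos ⟨by omega, hn1⟩]
          apply ih (seen ++ [r])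
          · simp only [List.length_append, List.length_cons, List.length_nil]
            push_cast
            omega
          · simp only [List.length_append, List.length_cons, List.length_nil]
            push_cast
            omega
          · rw [hpop]
            have hsplit := countP_gt_split (seen ++ [r]) running
            rw [habeq, if_pos hr] at hcnt1
            omega
          · rw [hpop]
            have : (0 : Int) ≤ ((seen ++ [r]).count (running + 1) : Int) := by positivity
            omega
          · intro v
            rw [dict_getD_erase]
            by_cases hv : v = running + 1
            · rw [if_pos hv, if_neg (by omega)]
            · rw [if_neg hv, hH1]
              split_ifs with h1 h2 h2
              · rfl
              · omega
              · omega
              · rfl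
          · exact hs1sort
          · exact hs1perm
      · simp only [if_neg hab]
        have hlt : ¬ ((seen ++ [r]).countP (fun x => decide (x > running)) : Int) ≥ running + 1 := by
          rw [hcnt1, if_pos hr]; omega
        rw [if_neg hlt]
        congr 1
        apply ih (seen ++ [r])
        · simp only [List.length_append, List.length_cons, List.length_nil]
          push_cast
          omega
        · simp only [List.length_append, List.length_cons, List.length_nil]
          push_cast
          omega
        · rw [hcnt1, if_pos hr]
        · omega
        · exact hH1
        · exact hs1sort
        · exact hs1perm
    · simp only [if_neg hr]
      have hlt : ¬ ((seen ++ [r]).countP (fun x => decide (x > running)) : Int) ≥ running + 1 := by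
        rw [hcnt1, if_neg hr]; omega
      rw [if_neg hlt]
      congr 1
      apply ih (seen ++ [r])
      · simp only [List.length_append, List.length_cons, List.length_nil]
        push_cast
        omega
      · simp only [List.length_append, List.length_cons, List.length_nil]
        push_cast
        omega
      · rw [hcnt1, if_neg hr]; omega
      · omega
      · intro v
        rw [hH]
        by_cases hcond : running < v ∧ v < n
        · have hvr : v ≠ r := by omega
          rw [if_pos hcond, if_pos hcond, crn v hvr]
        · rw [if_neg hcond, if_neg hcond]
      · exact hs1sort
      · exact hs1perm

-- ===== VERDICT (by name: the statement is the Claim_ definition above) =====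
theorem E_cum_spec : Claim_equal_E_cum := by
  intro rides _
  unfold Spec_E_cum E_cum E_cum_alt
  apply loop_eq (rides.length : Int) rides [] 0 0 PySem.Dict.empty []
  · simp
  · simp
  · simp
  · omega
  · intro v
    simp [PySem.Dict.getD_empty]
  · simp
  · exact List.Perm.refl []
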